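-- pv_equiv track=rewrite | github.com/sxrubyo/melissa-system | melissa_nuke_robot_phrases.py | _canonical_phrases
-- ===== SOURCE A (Python) =====
-- from typing import Any, Iterable, Tuple
--
-- EDGE_SEPARATOR_CHARS = ",;:.!?¡¿-–—"
--
-- def _normalize_phrase(phrase: str) -> str:
--     return phrase.strip().strip(EDGE_SEPARATOR_CHARS).strip()
--
-- def _canonical_phrases(phrases: Iterable[str]) -> Tuple[str, ...]:
--     seen = set()
--     ordered = []
--     for phrase in phrases:
--         normalized = _normalize_phrase(phrase)
--         if not normalized or normalized in seen:
--             continue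
--         seen.add(normalized)
--         ordered.append(normalized)
--     return tuple(sorted(ordered))
-- ===== SOURCE B (Python) =====
-- EDGE_SEPARATOR_CHARS = ",;:.!?¡¿-–—"
--
-- def _normalize_phrase(phrase: str) -> str:
--     return phrase.strip().strip(EDGE_SEPARATOR_CHARS).strip()
--
-- def _canonical_phrases(phrases):
--     kept = sorted(n for n in map(_normalize_phrase, phrases) if n)
--     out = []
--     prev = None
--     for n in kept:
--         if n != prev:
--             out.append(n)
--             prev = n
--     return tuple(out)
-- ===== Notes on version B (the rewrite author's own statement) =====
-- stated objective: alternative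
-- what changed: Replaces A's hash-set dedup with first-occurrence bookkeeping by sorting all non-empty normalized phrases first and then collapsing adjacent duplicates in one linear scan, with no membership structure at all.
import Mathlib
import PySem

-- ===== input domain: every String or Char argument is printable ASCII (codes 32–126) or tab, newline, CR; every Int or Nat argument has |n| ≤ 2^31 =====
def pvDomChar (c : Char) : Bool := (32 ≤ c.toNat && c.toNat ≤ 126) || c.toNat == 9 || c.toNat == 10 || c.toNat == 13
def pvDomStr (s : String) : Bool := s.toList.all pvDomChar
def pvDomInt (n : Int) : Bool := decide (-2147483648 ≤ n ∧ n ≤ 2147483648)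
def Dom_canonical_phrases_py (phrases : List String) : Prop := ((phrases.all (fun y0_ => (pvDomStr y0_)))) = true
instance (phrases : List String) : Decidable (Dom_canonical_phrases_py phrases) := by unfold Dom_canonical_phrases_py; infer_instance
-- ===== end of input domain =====

-- B sorts all non-empty normalized phrases first and collapses adjacent duplicates in one
-- linear scan, instead of A's set-membership dedup with separate order bookkeeping.

-- ===== PORT A =====
-- shared helper of both Pythons: phrase.strip().strip(EDGE_SEPARATOR_CHARS).strip()
def normalize_phrase_py (phrase : String) : String :=
  PySem.Str.strip (PySem.Str.stripChars (PySem.Str.strip phrase) ",;:.!?¡¿-–—")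

def canonical_phrases_py (phrases : List String) : List String :=
  let st := phrases.foldl
    (fun (acc : PySem.Set String × List String) phrase =>
      let normalized := normalize_phrase_py phrase
      if normalized = "" ∨ PySem.Set.contains acc.1 normalized then acc
      else (PySem.Set.add acc.1 normalized, acc.2 ++ [normalized]))
    (PySem.Set.empty, [])
  PySem.List.sorted st.2 (fun x => x) false

-- ===== PORT B =====
def canonical_phrases_py_alt (phrases : List String) : List String :=
  let kept := PySem.List.sorted
    ((phrases.map normalize_phrase_py).filter (fun n => n ≠ "")) (fun x => x) false
  (kept.foldl
    (fun (acc : List String × Option String) n =>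
      if some n ≠ acc.2 then (acc.1 ++ [n], some n) else acc)
    ([], none)).1

-- ===== PRECONDITION & SPEC =====
def Spec_canonical_phrases_py (phrases : List String) (out : List String) : Prop := out = canonical_phrases_py_alt phrases
instance (phrases : List String) (out : List String) : Decidable (Spec_canonical_phrases_py phrases out) := by unfold Spec_canonical_phrases_py; infer_instance

-- ===== CLAIM (what is proved, stated in full; the proofs are below) =====
def Claim_equal_canonical_phrases_py : Prop := ∀ (phrases : List String), Dom_canonical_phrases_py phrases → Spec_canonical_phrases_py phrases (canonical_phrases_py phrases)

-- ===== LEMMAS AND PROOFS =====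

-- B's loop, written structurally: collapse adjacent duplicates, `prev` the last emitted element
def collapseFrom : Option String → List String → List String
  | _, [] => []
  | prev, n :: t => if some n ≠ prev then n :: collapseFrom (some n) t else collapseFrom prev t

-- prev is a lower bound / strict lower bound (vacuous for none)
def ole (prev : Option String) (x : String) : Prop := ∀ p, prev = some p → p ≤ x
def olt (prev : Option String) (x : String) : Prop := ∀ p, prev = some p → p < x

theorem foldl_collapse (l : List String) :
    ∀ (out : List String) (prev : Option String),
    (l.foldl (fun (acc : List String × Option String) n =>
        if some n ≠ acc.2 then (acc.1 ++ [n], some n) else acc) (out, prev)).1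
      = out ++ collapseFrom prev l := by
  induction l with
  | nil => intro out prev; simp [collapseFrom]
  | cons n t ih =>
    intro out prev
    rw [List.foldl_cons]
    dsimp only
    by_cases h : some n = prev
    · rw [if_neg (not_not_intro h), ih]
      simp only [collapseFrom, if_neg (not_not_intro h)]
    · rw [if_pos h, ih]
      simp only [collapseFrom, if_pos h, List.append_assoc, List.singleton_append]

theorem collapse_master (l : List String) (hs : l.Pairwise (· ≤ ·)) :
    ∀ (prev : Option String), (∀ x ∈ l, ole prev x) →
      (collapseFrom prev l).Pairwise (· < ·) ∧
      (∀ x, x ∈ collapseFrom prev l ↔ (x ∈ l ∧ olt prev x)) := by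
  induction l with
  | nil => intro prev _; simp [collapseFrom]
  | cons n t ih =>
    intro prev hlb
    have hn : ∀ x ∈ t, n ≤ x := (List.pairwise_cons.mp hs).1
    have hst : t.Pairwise (· ≤ ·) := (List.pairwise_cons.mp hs).2
    by_cases h : some n = prev
    · -- n equals prev: skipped; recurse with the same prev
      have hlb' : ∀ x ∈ t, ole prev x := by
        intro x hx p hp
        have : p = n := by rw [← h] at hp; exact (Option.some_inj.mp hp).symm
        exact this ▸ hn x hx
      obtain ⟨hpw, hmem⟩ := ih hst prev hlb'
      rw [show collapseFrom prev (n :: t) = collapseFrom prev t from by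
        simp only [collapseFrom, if_neg (not_not_intro h)]]
      refine ⟨hpw, ?_⟩
      intro x
      rw [hmem x]
      constructor
      · rintro ⟨hx, hlt⟩; exact ⟨List.mem_cons_of_mem _ hx, hlt⟩
      · rintro ⟨hx, hlt⟩
        rcases List.mem_cons.mp hx with rfl | hx
        · exact absurd (hlt _ h.symm) (lt_irrefl _)
        · exact ⟨hx, hlt⟩
    · -- n is fresh: emitted; recurse with prev = some n
      have hlb' : ∀ x ∈ t, ole (some n) x := by
        intro x hx p hp
        exact (Option.some_inj.mp hp) ▸ hn x hx
      obtain ⟨hpw, hmem⟩ := ih hst (some n) hlb'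
      have hOLTn : olt prev n := by
        intro p hp
        have hle : p ≤ n := hlb n (List.mem_cons_self) p hp
        have hne : p ≠ n := fun e => h (by rw [hp, e])
        exact lt_of_le_of_ne hle hne
      rw [show collapseFrom prev (n :: t) = n :: collapseFrom (some n) t from by
        simp only [collapseFrom, if_pos h]]
      constructor
      · rw [List.pairwise_cons]
        refine ⟨?_, hpw⟩
        intro y hy
        exact ((hmem y).mp hy).2 n rfl
      · intro x
        simp only [List.mem_cons]
        rw [hmem x]
        constructor
        · rintro (rfl | ⟨hx, hlt⟩)
          · exact ⟨Or.inl rfl, hOLTn⟩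
          · refine ⟨Or.inr hx, ?_⟩
            intro p hp
            exact lt_trans (hOLTn p hp) (hlt n rfl)
        · rintro ⟨rfl | hx, hlt⟩
          · exact Or.inl rfl
          · by_cases hxn : x = n
            · exact Or.inl hxn
            · exact Or.inr ⟨hx, fun p hp => lt_of_le_of_ne ((Option.some_inj.mp hp) ▸ hn x hx) fun e => hxn ((Option.some_inj.mp hp) ▸ e.symm)⟩

-- A's fold (started with seen = ordered) is the Set.ofList fold over the filtered list
theorem foldA_eq (phrases : List String) :
    ∀ (s : List String),
    (phrases.foldl
      (fun (acc : PySem.Set String × List String) phrase =>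
        let normalized := normalize_phrase_py phrase
        if normalized = "" ∨ PySem.Set.contains acc.1 normalized then acc
        else (PySem.Set.add acc.1 normalized, acc.2 ++ [normalized]))
      (s, s)).2
    = ((phrases.map normalize_phrase_py).filter (fun n => n ≠ "")).foldl PySem.Set.add s := by
  induction phrases with
  | nil => intro s; simp
  | cons p t ih =>
    intro s
    rw [List.foldl_cons, List.map_cons, List.filter_cons]
    dsimp only
    by_cases h0 : normalize_phrase_py p = ""
    · rw [if_pos (Or.inl h0), ih s, if_neg (by simp [h0])]
    · by_cases hc : PySem.Set.contains s (normalize_phrase_py p) = true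
      · have hadd : PySem.Set.add s (normalize_phrase_py p) = s := by
          simp only [PySem.Set.add]; rw [if_pos hc]
        rw [if_pos (Or.inr hc), ih s, if_pos (by simp [h0]), List.foldl_cons, hadd]
      · have hadd : PySem.Set.add s (normalize_phrase_py p) = s ++ [normalize_phrase_py p] := by
          simp only [PySem.Set.add]; rw [if_neg hc]
        have hns : normalize_phrase_py p ∉ s := by
          simpa [PySem.Set.contains] using hc
        rw [if_neg (by simp [h0, hns]), hadd, ih (s ++ [normalize_phrase_py p]),
          if_pos (by simp [h0]), List.foldl_cons,
          show PySem.Set.add s (normalize_phrase_py p) = s ++ [normalize_phrase_py p] from hadd]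

-- ===== VERDICT (by name: the statement is the Claim_ definition above) =====
theorem canonical_phrases_py_spec : Claim_equal_canonical_phrases_py := by
  intro phrases _
  unfold Spec_canonical_phrases_py canonical_phrases_py canonical_phrases_py_alt
  set filtered := (phrases.map normalize_phrase_py).filter (fun n => n ≠ "") with hf
  -- A's ordered list is PySem.Set.ofList filtered
  have hA : (phrases.foldl
      (fun (acc : PySem.Set String × List String) phrase =>
        let normalized := normalize_phrase_py phrase
        if normalized = "" ∨ PySem.Set.contains acc.1 normalized then acc
        else (PySem.Set.add acc.1 normalized, acc.2 ++ [normalized]))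
      (PySem.Set.empty, [])).2 = PySem.Set.ofList filtered := by
    rw [show (PySem.Set.empty : PySem.Set String) = ([] : List String) from rfl]
    rw [foldA_eq phrases []]
    rw [PySem.Set.ofList_eq_foldl]
  -- B's result is collapseFrom none (sorted filtered)
  have hB : ((PySem.List.sorted filtered (fun x => x) false).foldl
      (fun (acc : List String × Option String) n =>
        if some n ≠ acc.2 then (acc.1 ++ [n], some n) else acc) ([], none)).1
      = collapseFrom none (PySem.List.sorted filtered (fun x => x) false) := by
    simpa using foldl_collapse (PySem.List.sorted filtered (fun x => x) false) [] none
  simp only [hA, hB]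
  -- both sides: sorted of the distinct elements of filtered
  have hsorted : (PySem.List.sorted filtered (fun x => x) false).Pairwise (· ≤ ·) :=
    PySem.List.sorted_pairwise filtered (fun x => x)
  obtain ⟨hpw, hmem⟩ := collapse_master _ hsorted none (by intro x _ p hp; cases hp)
  apply PySem.List.sorted_eq_of_perm_of_pairwise_lt
  · -- Perm with the deduped list
    have hnd1 : (collapseFrom none (PySem.List.sorted filtered (fun x => x) false)).Nodup :=
      hpw.imp ne_of_lt
    have hnd2 : (PySem.Set.ofList filtered).Nodup := by
      rw [← PySem.List.dedup_eq_ofList]; exact PySem.List.nodup_dedup filtered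
    refine (List.perm_ext_iff_of_nodup hnd1 hnd2).mpr ?_
    intro a
    rw [hmem a, ← PySem.List.dedup_eq_ofList, PySem.List.mem_dedup,
      PySem.List.mem_sorted]
    constructor
    · rintro ⟨ha, _⟩; exact ha
    · intro ha; exact ⟨ha, fun p hp => by cases hp⟩
  · exact hpw
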